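-- pv_equiv track=rewrite | github.com/sukhdev01/Error-detection-and-correction-IN-Computer_Network | 2DimentionalParityCheck.py | addingParity
-- ===== SOURCE A (Python) =====
-- def addingParity(string,div=5):
--     message=str()
--     #adding parity in rows format
--     while(string):
--         chunk = string[:div]
--         string = string[div:]
--         message+=chunk
--
--         sum_chunk=0
--         if len(chunk)==div:
--             for i in range(div):
--                 sum_chunk += int(chunk[i])
--             #parity adding
--             message+=str(sum_chunk%2)
--         else:
--             for i in range(div-len(chunk)): #padding zeros
--                 message+='0'
--             for i in range(len(chunk)):
--                 sum_chunk += int(chunk[i])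
--             #parity adding
--             message +=str(sum_chunk%2)
--
--     #adding parity in columns format
--     column_len=len(message)//(div+1)
--     for i in range(div):
--         sum_column=0
--         for j in range(column_len):
--             sum_column += int(message[i+(div+1)*j])
--         message += str(sum_column%2)
--     return message
-- ===== SOURCE B (Python) =====
-- def addingParity(string, div=5):
--     # Grid decomposition: rows of padded data + row parity, then column parities from the grid.
--     rows = [string[i:i + div] for i in range(0, len(string), div)]
--     out_rows = [chunk + '0' * (div - len(chunk)) + str(sum(int(c) for c in chunk) % 2)
--                 for chunk in rows]
--     cols = [str(sum(int(r[i]) for r in out_rows) % 2) for i in range(div)]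
--     return ''.join(out_rows) + ''.join(cols)
-- ===== Notes on version B (the rewrite author's own statement) =====
-- stated objective: simpler
-- what changed: B builds the parity grid explicitly - a list of padded rows with their row-parity bit, built by comprehensions, then column parities read as r[i] from each row - instead of A's single growing string updated in a while loop with stride index arithmetic message[i+(div+1)*j] and an integer-division row count.
-- outside the precondition, e.g. on addingParity('', 0): A returns '', B raises ValueError
import Mathlib
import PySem

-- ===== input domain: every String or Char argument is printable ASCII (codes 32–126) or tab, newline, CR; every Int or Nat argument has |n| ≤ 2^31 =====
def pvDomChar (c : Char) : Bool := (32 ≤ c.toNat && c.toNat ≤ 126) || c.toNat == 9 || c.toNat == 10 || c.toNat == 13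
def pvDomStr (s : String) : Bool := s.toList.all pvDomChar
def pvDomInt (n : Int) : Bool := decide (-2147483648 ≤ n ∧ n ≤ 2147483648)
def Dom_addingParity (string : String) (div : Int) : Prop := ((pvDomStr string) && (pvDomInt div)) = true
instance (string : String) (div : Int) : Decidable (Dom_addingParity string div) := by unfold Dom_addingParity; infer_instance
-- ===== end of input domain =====

-- B replaces A's single growing string with an explicit grid: padded rows (data + row parity) built by
-- comprehensions, column parities read per-row as r[i] instead of stride arithmetic message[i+(div+1)*j].

-- ===== PORT A =====
-- int(c) for a single digit character; exact on Pre_ (all characters are digits)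
def pvInt1 (c : Char) : Int := (c.toNat : Int) - 48

-- the 'while(string)' row loop of A; fuel = initial length (under Pre_ each pass strips ≥ 1 char)
def pvRowLoopA (div : Int) : Nat → List Char → List Char → List Char
  | 0, _, msg => msg
  | fuel + 1, s, msg =>
    if s = [] then msg
    else
      let chunk := PySem.List.slice s none (some div)
      let rest := PySem.List.slice s (some div) none
      let msg1 := msg ++ chunk
      if PySem.List.len chunk = div then
        let sumChunk := (PySem.List.pyRange 0 div 1).foldl
          (fun acc i => acc + pvInt1 (PySem.List.pyGetD chunk i '0')) 0
        pvRowLoopA div fuel rest (msg1 ++ PySem.Int.toChars (PySem.Int.mod sumChunk 2))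
      else
        let msg2 := (PySem.List.pyRange 0 (div - PySem.List.len chunk) 1).foldl
          (fun acc _ => acc ++ ['0']) msg1
        let sumChunk := (PySem.List.pyRange 0 (PySem.List.len chunk) 1).foldl
          (fun acc i => acc + pvInt1 (PySem.List.pyGetD chunk i '0')) 0
        pvRowLoopA div fuel rest (msg2 ++ PySem.Int.toChars (PySem.Int.mod sumChunk 2))

def addingParity (string : String) (div : Int) : String :=
  let s := string.toList
  let msg := pvRowLoopA div s.length s []
  let colLen := PySem.Int.floordiv (PySem.List.len msg) (div + 1)
  let final := (PySem.List.pyRange 0 div 1).foldl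
    (fun m i =>
      let sumCol := (PySem.List.pyRange 0 colLen 1).foldl
        (fun acc j => acc + pvInt1 (PySem.List.pyGetD m (i + (div + 1) * j) '0')) 0
      m ++ PySem.Int.toChars (PySem.Int.mod sumCol 2)) msg
  String.ofList final

-- ===== PORT B =====
-- one grid row: padded chunk plus its row-parity bit
def pvRowB (div : Int) (chunk : List Char) : List Char :=
  chunk ++ List.replicate ((div - PySem.List.len chunk).toNat) '0'
    ++ PySem.Int.toChars (PySem.Int.mod (chunk.foldl (fun a c => a + pvInt1 c) 0) 2)

def addingParity_alt (string : String) (div : Int) : String :=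
  let s := string.toList
  let rows := (PySem.List.pyRange 0 (PySem.List.len s) div).map
    (fun i => PySem.List.slice s (some i) (some (i + div)))
  let outRows := rows.map (pvRowB div)
  let cols := (PySem.List.pyRange 0 div 1).map
    (fun i => PySem.Int.toChars (PySem.Int.mod
      (outRows.foldl (fun a r => a + pvInt1 (PySem.List.pyGetD r i '0')) 0) 2))
  String.ofList (outRows.flatten ++ cols.flatten)

-- ===== PRECONDITION & SPEC =====
-- Pre_ excludes div ≤ 0 (A loops forever on nonempty input, and on empty input B's range(0,0,div) with
-- step 0 raises where A returns) and non-digit characters (A's int(c) raises ValueError).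
def Pre_addingParity (string : String) (div : Int) : Prop :=
  1 ≤ div ∧ string.toList.all (fun c => c.isDigit) = true
instance (string : String) (div : Int) : Decidable (Pre_addingParity string div) := by
  unfold Pre_addingParity; infer_instance
def pvWitness_addingParity : String × Int := ("1101", 3)

def Spec_addingParity (string : String) (div : Int) (out : String) : Prop :=
  out = addingParity_alt string div
instance (string : String) (div : Int) (out : String) : Decidable (Spec_addingParity string div out) := by
  unfold Spec_addingParity; infer_instance

-- ===== CLAIM (what is proved, stated in full; the proofs are below) =====
def Claim_equal_addingParity : Prop := ∀ (string : String) (div : Int),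
  Dom_addingParity string div → Pre_addingParity string div →
  Spec_addingParity string div (addingParity string div)

-- ===== LEMMAS AND PROOFS =====

-- the grid's list of data chunks (proof-side common shape)
def pvChunks (d : Nat) (s : List Char) : List (List Char) :=
  if s = [] ∨ d = 0 then [] else s.take d :: pvChunks d (s.drop d)
termination_by s.length
decreasing_by
  rename_i h
  rw [not_or] at h
  have h1 : s.length ≠ 0 := by simpa [List.length_eq_zero_iff] using h.1
  simp only [List.length_drop]
  omega

lemma pvChunks_nil (d : Nat) : pvChunks d [] = [] := by
  rw [pvChunks]; simp

lemma pvChunks_cons (d : Nat) (s : List Char) (hs : s ≠ []) (hd : d ≠ 0) :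
    pvChunks d s = s.take d :: pvChunks d (s.drop d) := by
  rw [pvChunks]; simp [hs, hd]

lemma pvChunks_mem_len (d : Nat) (s : List Char) (c : List Char)
    (hc : c ∈ pvChunks d s) : c.length ≤ d := by
  induction s using pvChunks.induct d with
  | case1 s h => rw [pvChunks] at hc; simp [h] at hc
  | case2 s h ih =>
    rw [pvChunks] at hc
    simp only [if_neg h] at hc
    rcases List.mem_cons.mp hc with rfl | hmem
    · simpa using List.length_take_le _ _
    · exact ih hmem

lemma pvFlatten_len (w : Nat) (R : List (List Char)) (hR : ∀ r ∈ R, r.length = w) :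
    R.flatten.length = w * R.length := by
  induction R with
  | nil => simp
  | cons r R ih =>
    simp only [List.flatten_cons, List.length_append, List.length_cons]
    rw [hR r (by simp), ih (fun r hr => hR r (by simp [hr]))]
    ring

-- str(x % 2) is one character
lemma pvToChars_mod_two (x : Int) : ∃ c : Char,
    PySem.Int.toChars (PySem.Int.mod x 2) = [c] := by
  have h0 := PySem.Int.mod_nonneg x (b := 2) (by norm_num)
  have h1 := PySem.Int.mod_lt x (b := 2) (by norm_num)
  have : PySem.Int.mod x 2 = 0 ∨ PySem.Int.mod x 2 = 1 := by omega
  rcases this with h | h <;> rw [h]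
  · exact ⟨'0', rfl⟩
  · exact ⟨'1', rfl⟩

lemma pvRowB_len (d : Nat) (chunk : List Char) (h : chunk.length ≤ d) :
    (pvRowB (d : Int) chunk).length = d + 1 := by
  obtain ⟨c, hc⟩ := pvToChars_mod_two (chunk.foldl (fun a c => a + pvInt1 c) 0)
  simp only [pvRowB, hc, PySem.List.len_eq, List.length_append, List.length_replicate,
    List.length_cons, List.length_nil]
  omega

-- A's zero-padding loop
lemma pvFoldl_zeros (l : List Int) (acc : List Char) :
    l.foldl (fun a _ => a ++ ['0']) acc = acc ++ List.replicate l.length '0' := by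
  induction l generalizing acc with
  | nil => simp
  | cons x l ih =>
    rw [List.foldl_cons, ih, List.length_cons, List.replicate_succ]
    simp

-- row phase: A's while loop builds exactly the flattened grid rows
lemma pvRowLoopA_eq (d : Nat) (hd : 1 ≤ d) :
    ∀ (fuel : Nat) (s msg : List Char), s.length ≤ fuel →
    pvRowLoopA (d : Int) fuel s msg = msg ++ ((pvChunks d s).map (pvRowB (d : Int))).flatten := by
  intro fuel
  induction fuel with
  | zero =>
    intro s msg hs
    have : s = [] := by
      cases s with
      | nil => rfl
      | cons a t => simp at hs
    subst this
    simp [pvRowLoopA, pvChunks_nil]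
  | succ fuel ih =>
    intro s msg hs
    by_cases hnil : s = []
    · subst hnil; simp [pvRowLoopA, pvChunks_nil]
    · have hchunk : PySem.List.slice s none (some (d : Int)) = s.take d :=
        PySem.List.slice_to_natCast s d
      have hrest : PySem.List.slice s (some (d : Int)) none = s.drop d :=
        PySem.List.slice_from_natCast s d
      have hlen1 : 1 ≤ s.length := by
        cases s with
        | nil => exact absurd rfl hnil
        | cons a t => simp
      have hrestlen : (s.drop d).length ≤ fuel := by
        simp only [List.length_drop]; omega
      have hsum : ∀ (c : List Char),
          (PySem.List.pyRange 0 (PySem.List.len c) 1).foldl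
            (fun acc i => acc + pvInt1 (PySem.List.pyGetD c i '0')) 0
          = c.foldl (fun a x => a + pvInt1 x) 0 := fun c =>
        PySem.List.foldl_pyRange_zero_pyGetD c '0' (fun a x => a + pvInt1 x) 0
      have hrow : pvRowB (d : Int) (s.take d)
          = s.take d ++ List.replicate (((d : Int) - PySem.List.len (s.take d)).toNat) '0'
            ++ PySem.Int.toChars (PySem.Int.mod ((s.take d).foldl (fun a x => a + pvInt1 x) 0) 2) := by
        simp [pvRowB]
      rw [pvRowLoopA]
      simp only [if_neg hnil, hchunk, hrest]
      by_cases heq : PySem.List.len (s.take d) = (d : Int)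
      · simp only [if_pos heq]
        have hs2 : (PySem.List.pyRange 0 ((d : Nat) : Int) 1).foldl
            (fun acc i => acc + pvInt1 (PySem.List.pyGetD (s.take d) i '0')) 0
            = (s.take d).foldl (fun a x => a + pvInt1 x) 0 := by
          rw [← heq]; exact hsum (s.take d)
        rw [hs2, ih _ _ hrestlen, pvChunks_cons d s hnil (by omega)]
        have hrepl : ((d : Int) - PySem.List.len (s.take d)).toNat = 0 := by
          rw [heq]; simp
        have hds : d ≤ s.length := by
          have heq' := heq
          rw [PySem.List.len_eq] at heq'
          have h7 : (List.take d s).length = d := by exact_mod_cast heq'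
          simp [List.length_take] at h7
          omega
        simp [hrow, List.append_assoc, hds]
      · simp only [if_neg heq]
        rw [pvFoldl_zeros, hsum, ih _ _ hrestlen, pvChunks_cons d s hnil (by omega)]
        simp [hrow, List.append_assoc]

-- B's range(0, len, div) chunking equals pvChunks (auxiliary Nat form)
lemma pvChunksB_aux (d : Nat) (hd : 1 ≤ d) :
    ∀ (n : Nat) (s : List Char), s.length ≤ n →
    (List.range ((s.length + d - 1) / d)).map (fun k => (s.drop (d * k)).take d) = pvChunks d s := by
  intro n
  induction n with
  | zero =>
    intro s hs
    have : s = [] := by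
      cases s with
      | nil => rfl
      | cons a t => simp at hs
    subst this
    simp only [List.length_nil]
    have h0 : (0 + d - 1) / d = 0 := Nat.div_eq_of_lt (by omega)
    rw [h0, pvChunks_nil]
    simp
  | succ n ih =>
    intro s hs
    by_cases hnil : s = []
    · subst hnil
      simp only [List.length_nil]
      have h0 : (0 + d - 1) / d = 0 := Nat.div_eq_of_lt (by omega)
      rw [h0, pvChunks_nil]
      simp
    · have hlen1 : 1 ≤ s.length := by
        cases s with
        | nil => exact absurd rfl hnil
        | cons a t => simp
      have hcount : (s.length + d - 1) / d = (s.length - 1) / d + 1 := by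
        have : s.length + d - 1 = (s.length - 1) + d := by omega
        rw [this, Nat.add_div_right _ (by omega)]
      have hcount' : ((s.drop d).length + d - 1) / d = (s.length - 1) / d := by
        simp only [List.length_drop]
        by_cases hcase : s.length ≤ d
        · have h1 : s.length - d = 0 := by omega
          have h2 : (0 + d - 1) / d = 0 := Nat.div_eq_of_lt (by omega)
          have h3 : (s.length - 1) / d = 0 := Nat.div_eq_of_lt (by omega)
          rw [h1, h2, h3]
        · have h4 : s.length - d + d - 1 = s.length - 1 := by omega
          rw [h4]
      rw [hcount, List.range_succ_eq_map, List.map_cons, List.map_map]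
      rw [pvChunks_cons d s hnil (by omega)]
      have hcomp : ((fun k => (s.drop (d * k)).take d) ∘ Nat.succ)
          = fun k => ((s.drop d).drop (d * k)).take d := by
        funext k
        simp only [Function.comp]
        rw [List.drop_drop]
        congr 2
        rw [Nat.succ_eq_add_one]
        ring
      congr 1
      rw [hcomp, ← hcount']
      exact ih (s.drop d) (by simp only [List.length_drop]; omega)
  
-- B's pyRange/slice chunk comprehension equals pvChunks
lemma pvChunksB_eq (d : Nat) (hd : 1 ≤ d) (s : List Char) :
    (PySem.List.pyRange 0 (PySem.List.len s) (d : Int)).map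
      (fun i => PySem.List.slice s (some i) (some (i + (d : Int)))) = pvChunks d s := by
  rw [PySem.List.len_eq, PySem.List.pyRange_of_pos _ _ (by exact_mod_cast hd)]
  have hcount : (if (0 : Int) < (s.length : Int)
      then (((s.length : Int) - 0 + (d : Int) - 1) / (d : Int)).toNat else 0)
      = (s.length + d - 1) / d := by
    by_cases h : (0 : Int) < (s.length : Int)
    · rw [if_pos h]
      have h1 : ((s.length : Int) - 0 + (d : Int) - 1) = ((s.length + d - 1 : Nat) : Int) := by
        push_cast; omega
      rw [h1, ← Int.natCast_div, Int.toNat_natCast]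
    · rw [if_neg h]
      have h0 : s.length = 0 := by omega
      rw [h0]
      exact (Nat.div_eq_of_lt (by omega)).symm
  rw [hcount, List.map_map, ← pvChunksB_aux d hd s.length s le_rfl]
  apply List.map_congr_left
  intro k _
  simp only [Function.comp]
  have h1 : (0 : Int) + (d : Int) * (k : Int) = ((d * k : Nat) : Int) := by push_cast; ring
  rw [h1, PySem.List.slice_natCast_add]

-- xs[i] ignores what sits to the right of position i
lemma pvGetD_append_left (xs ys : List Char) (i : Int) (d0 : Char)
    (h0 : 0 ≤ i) (h1 : i < xs.length) :
    PySem.List.pyGetD (xs ++ ys) i d0 = PySem.List.pyGetD xs i d0 := by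
  rw [PySem.List.pyGetD_eq_getElem _ d0 h0 (by simp; omega),
      PySem.List.pyGetD_eq_getElem _ d0 h0 (by simpa using h1)]
  exact List.getElem_append_left (by omega)

lemma pvGetD_append_right (xs ys : List Char) (t : Int) (d0 : Char)
    (h0 : 0 ≤ t) (h1 : t < ys.length) :
    PySem.List.pyGetD (xs ++ ys) ((xs.length : Int) + t) d0 = PySem.List.pyGetD ys t d0 := by
  rw [PySem.List.pyGetD_eq_getElem _ d0 (by omega) (by simp; omega),
      PySem.List.pyGetD_eq_getElem _ d0 h0 (by simpa using h1)]
  have ht : ((xs.length : Int) + t).toNat = xs.length + t.toNat := by omega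
  simp only [ht]
  rw [List.getElem_append_right (by omega)]
  congr 1
  omega

-- indexing a flattened grid of uniform-width rows is indexing one row
lemma pvGetFlat (w : Nat) (hw : 1 ≤ w) :
    ∀ (R : List (List Char)), (∀ r ∈ R, r.length = w) → ∀ (j : Nat), j < R.length →
      ∀ (i : Int), 0 ≤ i → i < (w : Int) →
    PySem.List.pyGetD R.flatten (i + (w : Int) * (j : Int)) '0'
      = PySem.List.pyGetD (R.getD j []) i '0' := by
  intro R
  induction R with
  | nil => intro _ j hj; simp at hj
  | cons r R ih =>
    intro hR j hj i h0 h1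
    have hr : r.length = w := hR r (by simp)
    have hR' : ∀ x ∈ R, x.length = w := fun x hx => hR x (by simp [hx])
    cases j with
    | zero =>
      simp only [Nat.cast_zero, mul_zero, add_zero, List.flatten_cons, List.getD_cons_zero]
      exact pvGetD_append_left r R.flatten i '0' h0 (by omega)
    | succ j =>
      have harith : i + (w : Int) * ((j + 1 : Nat) : Int)
          = (r.length : Int) + (i + (w : Int) * (j : Int)) := by
        rw [hr]; push_cast; ring
      have hflatlen : R.flatten.length = w * R.length := pvFlatten_len w R hR'
      have hj' : j < R.length := by
        simp only [List.length_cons] at hj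
        omega
      have hbound : i + (w : Int) * (j : Int) < (R.flatten.length : Int) := by
        rw [hflatlen]
        have e0 : (w : Int) * ((j : Int) + 1) = (w : Int) * (j : Int) + (w : Int) := by ring
        have e1 : (w : Int) * ((j : Int) + 1) ≤ (w : Int) * (R.length : Int) := by
          apply mul_le_mul_of_nonneg_left _ (by positivity)
          exact_mod_cast hj'
        push_cast
        linarith
      have hnn : (0 : Int) ≤ i + (w : Int) * (j : Int) :=
        add_nonneg h0 (by positivity)
      rw [List.flatten_cons, harith,
        pvGetD_append_right r R.flatten _ '0' hnn hbound,
        ih hR' j hj' i h0 h1]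
      simp

-- the outer column loop appends chars computed from the fixed prefix M0 only
lemma pvColLoop (F : List Char → Int → List Char) (g : Int → List Char) (M0 : List Char) :
    ∀ (l : List Int) (pre : List Char), (∀ (p : List Char) (i : Int), i ∈ l → F (M0 ++ p) i = g i) →
    l.foldl (fun m i => m ++ F m i) (M0 ++ pre) = (M0 ++ pre) ++ (l.map g).flatten := by
  intro l
  induction l with
  | nil => simp
  | cons x l ih =>
    intro pre h
    simp only [List.foldl_cons, List.map_cons, List.flatten_cons]
    rw [h pre x (by simp), List.append_assoc M0 pre (g x),
      ih (pre ++ g x) (fun p i hi => h p i (by simp [hi]))]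
    simp [List.append_assoc]

-- A's strided column sum over the flattened grid = B's per-row fold
lemma pvInnerSum (w : Nat) (hw : 1 ≤ w) (R : List (List Char))
    (hR : ∀ r ∈ R, r.length = w) (p : List Char) (i : Int) (h0 : 0 ≤ i) (h1 : i < (w : Int)) :
    (PySem.List.pyRange 0 ((R.length : Nat) : Int) 1).foldl
      (fun acc j => acc + pvInt1 (PySem.List.pyGetD (R.flatten ++ p) (i + (w : Int) * j) '0')) 0
    = R.foldl (fun a r => a + pvInt1 (PySem.List.pyGetD r i '0')) 0 := by
  rw [PySem.List.pyRange_zero_natCast, List.foldl_map]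
  have hflatlen : R.flatten.length = w * R.length := pvFlatten_len w R hR
  have hterm : ∀ (j : Nat), j < R.length →
      pvInt1 (PySem.List.pyGetD (R.flatten ++ p) (i + (w : Int) * (j : Nat)) '0')
      = pvInt1 (PySem.List.pyGetD (R.getD j []) i '0') := by
    intro j hj
    have hbound : i + (w : Int) * (j : Int) < (R.flatten.length : Int) := by
      rw [hflatlen]
      have h3 : (w : Int) * ((j : Int) + 1) ≤ (w : Int) * (R.length : Int) := by
        apply mul_le_mul_of_nonneg_left _ (by positivity)
        exact_mod_cast hj
      push_cast
      push_cast at h3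
      nlinarith
    rw [pvGetD_append_left _ p _ '0' (by positivity) hbound]
    rw [pvGetFlat w hw R hR j hj i h0 h1]
  -- fold over indices = fold over rows
  have : ∀ (N : Nat), N ≤ R.length → ∀ (c : Int),
      (List.range N).foldl
        (fun acc j => acc + pvInt1 (PySem.List.pyGetD (R.flatten ++ p) (i + (w : Int) * (j : Nat)) '0')) c
      = (R.take N).foldl (fun a r => a + pvInt1 (PySem.List.pyGetD r i '0')) c := by
    intro N
    induction N with
    | zero => intro _ c; simp
    | succ N ihN =>
      intro hN c
      rw [List.range_succ, List.foldl_append, ihN (by omega) c]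
      rw [List.take_add_one]
      simp only [List.foldl_append, List.foldl_cons, List.foldl_nil]
      rw [hterm N (by omega)]
      have : R[N]? = some (R.getD N []) := by
        rw [List.getD_eq_getElem?_getD, List.getElem?_eq_getElem (by omega)]
        simp
      rw [this]
      simp
  have hfin := this R.length le_rfl 0
  rwa [List.take_length] at hfin

-- ===== VERDICT (by name: the statement is the Claim_ definition above) =====
theorem addingParity_spec : Claim_equal_addingParity := by
  intro string div _ hpre
  obtain ⟨hdiv, _⟩ := hpre
  unfold Spec_addingParity
  lift div to Nat using (by omega) with d
  have hd : 1 ≤ d := by exact_mod_cast hdiv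
  have hRlen : ∀ r ∈ (pvChunks d string.toList).map (pvRowB (d : Int)), r.length = d + 1 := by
    intro r hr
    obtain ⟨c, hc, rfl⟩ := List.mem_map.mp hr
    exact pvRowB_len d c (pvChunks_mem_len d string.toList c hc)
  set R := (pvChunks d string.toList).map (pvRowB (d : Int)) with hRdef
  -- row phase
  have hrow : pvRowLoopA (d : Int) string.toList.length string.toList [] = R.flatten := by
    rw [pvRowLoopA_eq d hd string.toList.length string.toList [] le_rfl]
    simp [hRdef]
  -- column count
  have hflatlen : R.flatten.length = (d + 1) * R.length := pvFlatten_len (d + 1) R hRlen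
  have hcolLen : PySem.Int.floordiv (PySem.List.len R.flatten) ((d : Int) + 1)
      = ((R.length : Nat) : Int) := by
    rw [PySem.List.len_eq, hflatlen]
    have h2 : ((d : Int) + 1) = (((d + 1 : Nat)) : Int) := by push_cast; ring
    rw [h2]
    have h3 : (((d + 1) * R.length : Nat) : Int) = (((d + 1 : Nat) : Nat) : Int) * ((R.length : Nat) : Int) := by
      push_cast; ring
    rw [PySem.Int.floordiv_natCast]
    congr 1
    exact Nat.mul_div_cancel_left _ (by omega)
  -- column phase
  have hw1 : ((d + 1 : Nat) : Int) = (d : Int) + 1 := by push_cast; ring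
  have hcol : (PySem.List.pyRange 0 (d : Int) 1).foldl
      (fun m i =>
        m ++ PySem.Int.toChars (PySem.Int.mod
          ((PySem.List.pyRange 0 ((R.length : Nat) : Int) 1).foldl
            (fun acc j => acc + pvInt1 (PySem.List.pyGetD m (i + ((d : Int) + 1) * j) '0')) 0) 2))
      R.flatten
      = R.flatten ++ ((PySem.List.pyRange 0 (d : Int) 1).map
          (fun i => PySem.Int.toChars (PySem.Int.mod
            (R.foldl (fun a r => a + pvInt1 (PySem.List.pyGetD r i '0')) 0) 2))).flatten := by
    have hcl := pvColLoop
      (fun m i => PySem.Int.toChars (PySem.Int.mod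
        ((PySem.List.pyRange 0 ((R.length : Nat) : Int) 1).foldl
          (fun acc j => acc + pvInt1 (PySem.List.pyGetD m (i + ((d : Int) + 1) * j) '0')) 0) 2))
      (fun i => PySem.Int.toChars (PySem.Int.mod
        (R.foldl (fun a r => a + pvInt1 (PySem.List.pyGetD r i '0')) 0) 2))
      R.flatten (PySem.List.pyRange 0 (d : Int) 1) [] ?_
    · simpa using hcl
    · intro p i hi
      have hmem := (PySem.List.mem_pyRange_one).mp hi
      dsimp only
      have hs := pvInnerSum (d + 1) (by omega) R hRlen p i (by omega) (by push_cast; omega)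
      rw [hw1] at hs
      rw [hs]
  -- assemble
  have hA : addingParity string (d : Int)
      = String.ofList (R.flatten ++ ((PySem.List.pyRange 0 (d : Int) 1).map
          (fun i => PySem.Int.toChars (PySem.Int.mod
            (R.foldl (fun a r => a + pvInt1 (PySem.List.pyGetD r i '0')) 0) 2))).flatten) := by
    simp only [addingParity]
    rw [hrow, hcolLen, hcol]
  have hB : addingParity_alt string (d : Int)
      = String.ofList (R.flatten ++ ((PySem.List.pyRange 0 (d : Int) 1).map
          (fun i => PySem.Int.toChars (PySem.Int.mod
            (R.foldl (fun a r => a + pvInt1 (PySem.List.pyGetD r i '0')) 0) 2))).flatten) := by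
    simp only [addingParity_alt]
    rw [pvChunksB_eq d hd string.toList]
  rw [hA, hB]
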